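-- pv_equiv track=rewrite | github.com/n1k0ver3E/19T3_COMP9021_UNSW | Quiz2/quiz_2.py | return_reversed
-- ===== SOURCE A (Python) =====
-- def return_reversed(original_mapping):
--     result =dict()
--     dict1 = dict()
--     for i in list(original_mapping.values()):
--         result[list(original_mapping.values()).count(i)]={}
--     for value in original_mapping.values():
--         temp =[]
--         for key in original_mapping.keys():
--             if value == original_mapping[key]:
--                 temp.append(key)
--         dict1[value] = temp
--     for k,v in dict1.items():
--         for r in result:
--             if len(v) == r:
--                 result[r][k]=v
--     return result
-- ===== SOURCE B (Python) =====
-- def return_reversed(original_mapping):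
--     groups = {}
--     for key, value in original_mapping.items():
--         groups.setdefault(value, []).append(key)
--     result = {}
--     for value, keys in groups.items():
--         result.setdefault(len(keys), {})[value] = keys
--     return result
-- ===== Notes on version B (the rewrite author's own statement) =====
-- stated objective: faster
-- what changed: A rescans the whole mapping for every value (rebuilding values() and counting per value, re-filtering all keys per value, then matching each group against every count key); B makes one pass grouping keys by value with setdefault, then one pass bucketing each group by its length, removing all inner scans.
import Mathlib
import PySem

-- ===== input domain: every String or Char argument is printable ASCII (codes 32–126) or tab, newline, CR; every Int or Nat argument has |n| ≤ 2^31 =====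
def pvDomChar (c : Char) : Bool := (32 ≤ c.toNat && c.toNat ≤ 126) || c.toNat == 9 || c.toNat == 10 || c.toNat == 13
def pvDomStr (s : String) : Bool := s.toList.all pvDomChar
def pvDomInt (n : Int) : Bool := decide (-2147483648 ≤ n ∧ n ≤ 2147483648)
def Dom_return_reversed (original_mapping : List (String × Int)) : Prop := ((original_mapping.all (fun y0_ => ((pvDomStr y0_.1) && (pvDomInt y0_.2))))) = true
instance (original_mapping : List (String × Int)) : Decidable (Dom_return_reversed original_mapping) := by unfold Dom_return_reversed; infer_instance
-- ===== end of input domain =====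

-- B groups keys by value in one pass and buckets the groups by length, instead of A's
-- per-value rescans of the whole mapping; equivalence of the RETURN value is proved below.

-- ===== PORT A =====
-- literal transliteration of A; `original_mapping[key]` is ported as `get? key = some value`
-- (exact: every looked-up key comes from `keys`, so Python's lookup never raises)
def return_reversed (original_mapping : List (String × Int)) : List (Int × List (Int × List String)) :=
  let d := PySem.Dict.mk original_mapping
  let vals := d.values
  let result : PySem.Dict Int (PySem.Dict Int (List String)) :=
    vals.foldl (fun r i => r.insert ((vals.count i : Int)) PySem.Dict.empty) PySem.Dict.empty
  let dict1 : PySem.Dict Int (List String) :=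
    vals.foldl (fun d1 value =>
      let temp := d.keys.foldl
        (fun temp key => if d.get? key = some value then temp ++ [key] else temp) ([] : List String)
      d1.insert value temp) PySem.Dict.empty
  let result2 := dict1.items.foldl (fun res kv =>
      res.keys.foldl (fun r2 r =>
        if ((kv.2.length : Int)) = r then r2.modify r PySem.Dict.empty (fun dd => dd.insert kv.1 kv.2)
        else r2) res) result
  result2.items.map (fun p => (p.1, p.2.items))

-- ===== PORT B =====
def return_reversed_alt (original_mapping : List (String × Int)) : List (Int × List (Int × List String)) :=
  let groups : PySem.Dict Int (List String) :=
    original_mapping.foldl (fun g p => g.modify p.2 [] (fun ks => ks ++ [p.1])) PySem.Dict.empty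
  let result : PySem.Dict Int (PySem.Dict Int (List String)) :=
    groups.items.foldl (fun res p =>
      res.modify ((p.2.length : Int)) PySem.Dict.empty (fun dd => dd.insert p.1 p.2)) PySem.Dict.empty
  result.items.map (fun p => (p.1, p.2.items))

-- ===== PRECONDITION & SPEC =====
-- Pre_ excludes association lists with a duplicated key: those do not represent any Python
-- dict (the harness's dict literal collapses them before A ever runs), so nothing is claimed there.
def Pre_return_reversed (original_mapping : List (String × Int)) : Prop :=
  (original_mapping.map Prod.fst).Nodup
instance (original_mapping : List (String × Int)) : Decidable (Pre_return_reversed original_mapping) := by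
  unfold Pre_return_reversed; infer_instance
def pvWitness_return_reversed : (List (String × Int)) := [("a", 1), ("b", 2), ("c", 1), ("d", 3)]
def Spec_return_reversed (original_mapping : List (String × Int)) (out : List (Int × List (Int × List String))) : Prop := out = return_reversed_alt original_mapping
instance (original_mapping : List (String × Int)) (out : List (Int × List (Int × List String))) : Decidable (Spec_return_reversed original_mapping out) := by unfold Spec_return_reversed; infer_instance

-- ===== CLAIM (what is proved, stated in full; the proofs are below) =====
def Claim_equal_return_reversed : Prop := ∀ (original_mapping : List (String × Int)), Dom_return_reversed original_mapping → Pre_return_reversed original_mapping → Spec_return_reversed original_mapping (return_reversed original_mapping)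

-- ===== LEMMAS AND PROOFS =====

theorem pv_ofList_filter {α : Type} [BEq α] [LawfulBEq α] (p : α → Bool) (l : List α) :
    PySem.Set.ofList (l.filter p) = (PySem.Set.ofList l).filter p := by
  induction l with
  | nil => rfl
  | cons x t ih =>
    by_cases hp : p x
    · simp only [List.filter_cons, hp, if_true, PySem.Set.ofList_cons, PySem.Set.discard, ih,
        List.filter_filter]
      congr 1
      apply List.filter_congr
      intro a _
      rw [Bool.and_comm]
    · simp only [List.filter_cons, hp, Bool.false_eq_true, if_false, PySem.Set.ofList_cons,
        PySem.Set.discard, ih, List.filter_filter]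
      apply List.filter_congr
      intro a _
      by_cases hax : a = x
      · subst hax; simp [hp]
      · simp [hax]

theorem pv_ofList_map_ofList {α β : Type} [BEq α] [LawfulBEq α] [BEq β] [LawfulBEq β]
    (f : α → β) (l : List α) :
    PySem.Set.ofList (l.map f) = PySem.Set.ofList ((PySem.Set.ofList l).map f) := by
  match l with
  | [] => rfl
  | x :: t =>
    have hlen : (t.filter (fun a => !a == x)).length < (x :: t).length :=
      Nat.lt_succ_of_le (List.length_filter_le _ _)
    have ih := pv_ofList_map_ofList f (t.filter (fun a => !a == x))
    have hfm : ∀ (u : List α),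
        (u.filter (fun a => !f a == f x)).map f = (u.map f).filter (fun b => !b == f x) := by
      intro u
      rw [List.filter_map]
      rfl
    calc PySem.Set.ofList ((x :: t).map f)
        = f x :: ((PySem.Set.ofList (t.map f)).filter (fun b => !b == f x)) := by
          simp [PySem.Set.ofList_cons, PySem.Set.discard]
      _ = f x :: PySem.Set.ofList ((t.map f).filter (fun b => !b == f x)) := by
          rw [pv_ofList_filter]
      _ = f x :: PySem.Set.ofList ((t.filter (fun a => !f a == f x)).map f) := by
          rw [hfm]
      _ = f x :: PySem.Set.ofList (((t.filter (fun a => !a == x)).filter (fun a => !f a == f x)).map f) := by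
          congr 3
          rw [List.filter_filter]
          apply List.filter_congr
          intro a _
          by_cases h : f a = f x
          · simp [h]
          · have hax : (a == x) = false := by
              by_cases hax : a = x
              · subst hax; exact absurd rfl h
              · simp [hax]
            simp [hax]
      _ = f x :: PySem.Set.ofList (((t.filter (fun a => !a == x)).map f).filter (fun b => !b == f x)) := by
          rw [hfm]
      _ = f x :: (PySem.Set.ofList ((t.filter (fun a => !a == x)).map f)).filter (fun b => !b == f x) := by
          rw [pv_ofList_filter]
      _ = f x :: (PySem.Set.ofList ((PySem.Set.ofList (t.filter (fun a => !a == x))).map f)).filter (fun b => !b == f x) := by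
          rw [ih]
      _ = PySem.Set.ofList ((PySem.Set.ofList (x :: t)).map f) := by
          rw [PySem.Set.ofList_cons]
          simp only [PySem.Set.discard, List.map_cons, PySem.Set.ofList_cons, PySem.Set.discard]
          congr 2
          rw [pv_ofList_filter]
termination_by l.length
decreasing_by exact Nat.lt_succ_of_le (List.length_filter_le _ _)

theorem pv_get?_foldl_insert_fun {ν : Type} (l : List Int) (f : Int → ν)
    (d : PySem.Dict Int ν) (v : Int) :
    (l.foldl (fun d x => d.insert x (f x)) d).get? v
      = if v ∈ l then some (f v) else d.get? v := by
  induction l generalizing d with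
  | nil => simp
  | cons x t ih =>
    simp only [List.foldl_cons, ih, List.mem_cons]
    by_cases hvt : v ∈ t
    · simp [hvt]
    · by_cases hvx : v = x
      · subst hvx; simp [hvt, PySem.Dict.get?_insert_self]
      · rw [if_neg hvt, if_neg (show ¬(v = x ∨ v ∈ t) by tauto)]
        exact PySem.Dict.get?_insert_of_ne _ _ hvx

theorem pv_items_foldl_insert_fun {ν : Type} (l : List Int) (f : Int → ν) :
    (l.foldl (fun d x => d.insert x (f x)) (PySem.Dict.empty : PySem.Dict Int ν)).items
      = (PySem.Set.ofList l).map (fun x => (x, f x)) := by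
  have hk : (l.foldl (fun d x => d.insert x (f x)) (PySem.Dict.empty : PySem.Dict Int ν)).keys
      = PySem.Set.ofList l := by
    rw [PySem.Dict.keys_foldl_insert]
    simp [PySem.Dict.keys_empty, PySem.Set.update_nil_left]
  have hnd : (l.foldl (fun d x => d.insert x (f x)) (PySem.Dict.empty : PySem.Dict Int ν)).keys.Nodup := by
    rw [hk]; exact PySem.Set.nodup_ofList l
  rw [PySem.Dict.items_eq_map_keys _ hnd (f 0), hk]
  apply List.map_congr_left
  intro x hx
  have hmem : x ∈ l := (PySem.Set.mem_ofList l x).1 hx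
  have := pv_get?_foldl_insert_fun l f PySem.Dict.empty x
  rw [if_pos hmem] at this
  simp [PySem.Dict.getD_eq_get?_getD, this]

-- getD of the bucketing fold: collects the pairs whose length-key is c
theorem pv_getD_foldl_bucket (G : List (Int × List String))
    (d : PySem.Dict Int (PySem.Dict Int (List String))) (c : Int) :
    (G.foldl (fun res p =>
        res.modify ((p.2.length : Int)) PySem.Dict.empty (fun dd => dd.insert p.1 p.2)) d).getD c PySem.Dict.empty
      = (G.filter (fun p => ((p.2.length : Int) == c))).foldl
          (fun dd p => dd.insert p.1 p.2) (d.getD c PySem.Dict.empty) := by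
  induction G generalizing d with
  | nil => simp
  | cons q t ih =>
    simp only [List.foldl_cons, List.filter_cons, ih]
    by_cases hc : ((q.2.length : Int)) = c
    · simp only [hc, beq_self_eq_true, if_true, List.foldl_cons]
      rw [PySem.Dict.getD_modify, if_pos rfl]
    · rw [show ((q.2.length : Int) == c) = false by simp [hc]]
      simp only [Bool.false_eq_true, if_false]
      rw [PySem.Dict.getD_modify, if_neg (fun h => hc h.symm)]

-- the inner loop of A does nothing when the target is absent …
theorem pv_inner_none (ks : List Int) (t : Int)
    (g : PySem.Dict Int (List String) → PySem.Dict Int (List String))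
    (res : PySem.Dict Int (PySem.Dict Int (List String))) (hmem : t ∉ ks) :
    ks.foldl (fun r2 r => if t = r then r2.modify r PySem.Dict.empty g else r2) res = res := by
  induction ks generalizing res with
  | nil => rfl
  | cons x xs ih =>
    have hx : t ≠ x := fun h => hmem (h ▸ List.mem_cons_self)
    simp only [List.foldl_cons, if_neg hx]
    exact ih res (fun h => hmem (List.mem_cons_of_mem _ h))

-- … and is a single modify when the target occurs exactly once
theorem pv_inner_one (ks : List Int) (t : Int)
    (g : PySem.Dict Int (List String) → PySem.Dict Int (List String))
    (res : PySem.Dict Int (PySem.Dict Int (List String)))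
    (hnd : ks.Nodup) (hmem : t ∈ ks) :
    ks.foldl (fun r2 r => if t = r then r2.modify r PySem.Dict.empty g else r2) res
      = res.modify t PySem.Dict.empty g := by
  induction ks generalizing res with
  | nil => cases hmem
  | cons x xs ih =>
    by_cases hx : t = x
    · subst hx
      simp only [List.foldl_cons, if_true]
      exact pv_inner_none xs t g _ (List.Nodup.notMem hnd)
    · simp only [List.foldl_cons, if_neg hx]
      have : t ∈ xs := by
        rcases List.mem_cons.1 hmem with h | h
        · exact absurd h hx
        · exact h
      exact ih _ (List.Nodup.of_cons hnd) this

-- A's fill loop (inner scan over the count keys) is the bucketing fold, key set preserved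
theorem pv_fill_eq_bucket (G : List (Int × List String))
    (res : PySem.Dict Int (PySem.Dict Int (List String)))
    (hnd : res.keys.Nodup) (hmem : ∀ p ∈ G, ((p.2.length : Int)) ∈ res.keys) :
    G.foldl (fun res kv =>
        res.keys.foldl (fun r2 r =>
          if ((kv.2.length : Int)) = r then r2.modify r PySem.Dict.empty (fun dd => dd.insert kv.1 kv.2)
          else r2) res) res
      = G.foldl (fun res p =>
          res.modify ((p.2.length : Int)) PySem.Dict.empty (fun dd => dd.insert p.1 p.2)) res := by
  induction G generalizing res with
  | nil => rfl
  | cons q t ih =>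
    simp only [List.foldl_cons]
    rw [pv_inner_one _ _ _ _ hnd (hmem q List.mem_cons_self)]
    have hkeys : (res.modify ((q.2.length : Int)) PySem.Dict.empty (fun dd => dd.insert q.1 q.2)).keys = res.keys := by
      rw [PySem.Dict.keys_modify]
      exact PySem.Dict.keys_insert_of_contains _ _
        ((PySem.Dict.contains_iff_mem_keys _ _).2 (hmem q List.mem_cons_self))
    exact ih _ (hkeys ▸ hnd) (fun p hp => hkeys ▸ hmem p (List.mem_cons_of_mem _ hp))

-- A's inner key scan computes the group of `value` (unique keys: each lookup returns that row's value)
theorem pv_temp_eq (m : List (String × Int)) (hnd : (m.map Prod.fst).Nodup) (value : Int) :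
    (PySem.Dict.mk m).keys.foldl
      (fun temp key => if (PySem.Dict.mk m).get? key = some value then temp ++ [key] else temp)
      ([] : List String)
    = (m.filter (fun p => p.2 == value)).map Prod.fst := by
  have hkn : (PySem.Dict.mk m).keys.Nodup := hnd
  rw [PySem.List.foldl_append_ite_eq_filter]
  show List.filter _ ((PySem.Dict.mk m).keys) = _
  have : (PySem.Dict.mk m).keys = m.map Prod.fst := rfl
  rw [this, List.filter_map]
  congr 1
  apply List.filter_congr
  intro p hp
  have hg : (PySem.Dict.mk m).get? p.1 = some p.2 :=
    PySem.Dict.get?_of_mem_items _ (by exact hp) hkn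
  simp only [Function.comp, hg, Option.some.injEq]
  exact Eq.symm (Bool.beq_eq_decide_eq p.2 value)

-- B's grouping fold: getD returns the group of c
theorem pv_groups_getD (m : List (String × Int)) (d : PySem.Dict Int (List String)) (c : Int) :
    (m.foldl (fun g p => g.modify p.2 [] (fun ks => ks ++ [p.1])) d).getD c []
      = d.getD c [] ++ (m.filter (fun p => p.2 == c)).map Prod.fst := by
  have hswap : m.foldl (fun g p => g.modify p.2 [] (fun ks => ks ++ [p.1])) d
      = (m.map Prod.swap).foldl (fun g p => g.modify p.1 [] (fun ks => ks ++ [p.2])) d := by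
    rw [List.foldl_map]
    rfl
  rw [hswap, PySem.Dict.getD_foldl_modify_append]
  congr 1
  rw [List.filter_map]
  rw [List.map_map]
  rfl

-- B's grouping dict, characterised: one entry per distinct value, in first-occurrence order
theorem pv_groups_items (m : List (String × Int)) :
    (m.foldl (fun g p => g.modify p.2 [] (fun ks => ks ++ [p.1]))
        (PySem.Dict.empty : PySem.Dict Int (List String))).items
      = (PySem.Set.ofList (m.map (fun p => p.2))).map
          (fun v => (v, (m.filter (fun p => p.2 == v)).map Prod.fst)) := by
  have hk : (m.foldl (fun g p => g.modify p.2 [] (fun ks => ks ++ [p.1]))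
      (PySem.Dict.empty : PySem.Dict Int (List String))).keys
      = PySem.Set.ofList (m.map (fun p => p.2)) := by
    rw [PySem.Dict.keys_foldl_modify_key m (fun p => p.2) [] (fun _ p => (fun ks => ks ++ [p.1]))]
    rw [PySem.Dict.keys_empty, PySem.Set.update_nil_left]
  have hnd : (m.foldl (fun g p => g.modify p.2 [] (fun ks => ks ++ [p.1]))
      (PySem.Dict.empty : PySem.Dict Int (List String))).keys.Nodup := by
    rw [hk]; exact PySem.Set.nodup_ofList _
  rw [PySem.Dict.items_eq_map_keys _ hnd [], hk]
  apply List.map_congr_left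
  intro v hv
  rw [pv_groups_getD m PySem.Dict.empty v, PySem.Dict.getD_empty, List.nil_append]

-- updating a set with elements it already has changes nothing
theorem pv_update_of_subset {α : Type} [BEq α] [LawfulBEq α] (s : PySem.Set α) (xs : List α)
    (h : ∀ x ∈ xs, x ∈ s) : PySem.Set.update s xs = s := by
  rw [PySem.Set.update_eq_append_filter]
  have hnil : (PySem.Set.ofList xs).filter (fun y => !(PySem.Set.contains s y)) = [] := by
    apply List.filter_eq_nil_iff.2
    intro a ha
    have hax : a ∈ xs := (PySem.Set.mem_ofList xs a).1 ha
    simp [h a hax]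
  rw [hnil, List.append_nil]

-- A's dict1 equals the canonical grouping (needs unique keys for the lookups)
theorem pv_dict1_items (m : List (String × Int)) (hpre : (m.map Prod.fst).Nodup) :
    ((m.map (fun p => p.2)).foldl (fun d1 value =>
        d1.insert value ((PySem.Dict.mk m).keys.foldl
          (fun temp key => if (PySem.Dict.mk m).get? key = some value then temp ++ [key] else temp)
          ([] : List String))) PySem.Dict.empty).items
      = (PySem.Set.ofList (m.map (fun p => p.2))).map
          (fun v => (v, (m.filter (fun p => p.2 == v)).map Prod.fst)) := by
  have h1 : (m.map (fun p => p.2)).foldl (fun d1 value =>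
        d1.insert value ((PySem.Dict.mk m).keys.foldl
          (fun temp key => if (PySem.Dict.mk m).get? key = some value then temp ++ [key] else temp)
          ([] : List String))) PySem.Dict.empty
      = (m.map (fun p => p.2)).foldl (fun d1 value =>
          d1.insert value ((m.filter (fun p => p.2 == value)).map Prod.fst)) PySem.Dict.empty :=
    PySem.List.foldl_congr_mem _ _ _ _ (fun acc x _ => by rw [pv_temp_eq m hpre x])
  rw [h1]
  exact pv_items_foldl_insert_fun _ _



-- final dict of the bucketing fold from an all-empty dict over exactly the bucket keys
theorem pv_bucket_items_start (G : List (Int × List String))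
    (res0 : PySem.Dict Int (PySem.Dict Int (List String)))
    (hnd0 : res0.keys.Nodup)
    (hget0 : ∀ c ∈ res0.keys, res0.getD c PySem.Dict.empty = PySem.Dict.empty)
    (hkeys : res0.keys = PySem.Set.ofList (G.map (fun p => ((p.2.length : Int))))) :
    (G.foldl (fun res p =>
        res.modify ((p.2.length : Int)) PySem.Dict.empty (fun dd => dd.insert p.1 p.2)) res0).items
      = (PySem.Set.ofList (G.map (fun p => ((p.2.length : Int))))).map
          (fun c => (c, (G.filter (fun p => ((p.2.length : Int) == c))).foldl
            (fun dd p => dd.insert p.1 p.2) PySem.Dict.empty)) := by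
  have hmem : ∀ p ∈ G, ((p.2.length : Int)) ∈ res0.keys := by
    intro p hp
    rw [hkeys]
    exact (PySem.Set.mem_ofList _ _).2 (List.mem_map.2 ⟨p, hp, rfl⟩)
  have hkA : (G.foldl (fun res p =>
      res.modify ((p.2.length : Int)) PySem.Dict.empty (fun dd => dd.insert p.1 p.2)) res0).keys
      = res0.keys := by
    rw [PySem.Dict.keys_foldl_modify_key G (fun p => ((p.2.length : Int))) PySem.Dict.empty
      (fun _ p => (fun dd => dd.insert p.1 p.2))]
    exact pv_update_of_subset _ _ (fun x hx => by
      rcases List.mem_map.1 hx with ⟨p, hp, rfl⟩; exact hmem p hp)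
  rw [PySem.Dict.items_eq_map_keys _ (hkA ▸ hnd0) PySem.Dict.empty, hkA, hkeys]
  apply List.map_congr_left
  intro c hc
  have hc0 : c ∈ res0.keys := hkeys ▸ hc
  rw [pv_getD_foldl_bucket, hget0 c hc0]

-- the same bucketing fold started from the empty dict builds the same entries
theorem pv_bucket_items_empty (G : List (Int × List String)) :
    (G.foldl (fun res p =>
        res.modify ((p.2.length : Int)) PySem.Dict.empty (fun dd => dd.insert p.1 p.2))
        (PySem.Dict.empty : PySem.Dict Int (PySem.Dict Int (List String)))).items
      = (PySem.Set.ofList (G.map (fun p => ((p.2.length : Int))))).map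
          (fun c => (c, (G.filter (fun p => ((p.2.length : Int) == c))).foldl
            (fun dd p => dd.insert p.1 p.2) PySem.Dict.empty)) := by
  have hk : (G.foldl (fun res p =>
      res.modify ((p.2.length : Int)) PySem.Dict.empty (fun dd => dd.insert p.1 p.2))
      (PySem.Dict.empty : PySem.Dict Int (PySem.Dict Int (List String)))).keys
      = PySem.Set.ofList (G.map (fun p => ((p.2.length : Int)))) := by
    rw [PySem.Dict.keys_foldl_modify_key G (fun p => ((p.2.length : Int))) PySem.Dict.empty
      (fun _ p => (fun dd => dd.insert p.1 p.2)), PySem.Dict.keys_empty,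
      PySem.Set.update_nil_left]
  rw [PySem.Dict.items_eq_map_keys _ (by rw [hk]; exact PySem.Set.nodup_ofList _) PySem.Dict.empty, hk]
  apply List.map_congr_left
  intro c hc
  rw [pv_getD_foldl_bucket, PySem.Dict.getD_empty]

-- ===== VERDICT (by name: the statement is the Claim_ definition above) =====
theorem return_reversed_spec : Claim_equal_return_reversed := by
  intro m _ hpre
  unfold Spec_return_reversed
  simp only [return_reversed, return_reversed_alt]
  have hv : (PySem.Dict.mk m).values = m.map (fun p => p.2) := rfl
  rw [hv, pv_dict1_items m hpre, pv_groups_items m]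
  have hres0 : (m.map (fun p => p.2)).foldl
        (fun r i => r.insert (((m.map (fun p => p.2)).count i : Int)) PySem.Dict.empty)
        (PySem.Dict.empty : PySem.Dict Int (PySem.Dict Int (List String)))
      = ((m.map (fun p => p.2)).map (fun i => (((m.map (fun p => p.2)).count i : Int)))).foldl
          (fun r c => r.insert c PySem.Dict.empty) PySem.Dict.empty := by
    simp only [List.foldl_map]
  rw [hres0]
  -- canonical grouping list and its lengths
  have hlen : ∀ v, ((m.filter (fun p => p.2 == v)).map Prod.fst).length
      = (m.map (fun p => p.2)).count v := by
    intro v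
    rw [List.length_map, List.count_eq_countP, List.countP_map, ← List.countP_eq_length_filter]
    rfl
  have hkeys0 : (((m.map (fun p => p.2)).map (fun i => (((m.map (fun p => p.2)).count i : Int)))).foldl
        (fun r c => r.insert c PySem.Dict.empty)
        (PySem.Dict.empty : PySem.Dict Int (PySem.Dict Int (List String)))).keys
      = PySem.Set.ofList ((m.map (fun p => p.2)).map (fun i => (((m.map (fun p => p.2)).count i : Int)))) := by
    rw [PySem.Dict.keys_foldl_insert _ (fun _ c => PySem.Dict.empty), PySem.Dict.keys_empty,
      PySem.Set.update_nil_left]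
  have hnd0 : (((m.map (fun p => p.2)).map (fun i => (((m.map (fun p => p.2)).count i : Int)))).foldl
        (fun r c => r.insert c PySem.Dict.empty)
        (PySem.Dict.empty : PySem.Dict Int (PySem.Dict Int (List String)))).keys.Nodup := by
    rw [hkeys0]; exact PySem.Set.nodup_ofList _
  have hget0 : ∀ c ∈ (((m.map (fun p => p.2)).map (fun i => (((m.map (fun p => p.2)).count i : Int)))).foldl
        (fun r c => r.insert c PySem.Dict.empty)
        (PySem.Dict.empty : PySem.Dict Int (PySem.Dict Int (List String)))).keys,
      (((m.map (fun p => p.2)).map (fun i => (((m.map (fun p => p.2)).count i : Int)))).foldl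
        (fun r c => r.insert c PySem.Dict.empty)
        (PySem.Dict.empty : PySem.Dict Int (PySem.Dict Int (List String)))).getD c PySem.Dict.empty
        = PySem.Dict.empty := by
    intro c hc
    have hcm : c ∈ (m.map (fun p => p.2)).map (fun i => (((m.map (fun p => p.2)).count i : Int))) :=
      (PySem.Set.mem_ofList _ _).1 (hkeys0 ▸ hc)
    have h := pv_get?_foldl_insert_fun (ν := PySem.Dict Int (List String))
      ((m.map (fun p => p.2)).map (fun i => (((m.map (fun p => p.2)).count i : Int))))
      (fun _ => PySem.Dict.empty) PySem.Dict.empty c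
    rw [if_pos hcm] at h
    rw [PySem.Dict.getD_eq_get?_getD, h]
    rfl
  -- the bucket keys of the canonical grouping are exactly the count keys
  have hkeq : (((m.map (fun p => p.2)).map (fun i => (((m.map (fun p => p.2)).count i : Int)))).foldl
        (fun r c => r.insert c PySem.Dict.empty)
        (PySem.Dict.empty : PySem.Dict Int (PySem.Dict Int (List String)))).keys
      = PySem.Set.ofList (((PySem.Set.ofList (m.map (fun p => p.2))).map
          (fun v => (v, (m.filter (fun p => p.2 == v)).map Prod.fst))).map
          (fun p => ((p.2.length : Int)))) := by
    rw [hkeys0]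
    have hml : ((PySem.Set.ofList (m.map (fun p => p.2))).map
          (fun v => (v, (m.filter (fun p => p.2 == v)).map Prod.fst))).map
          (fun p : Int × List String => ((p.2.length : Int)))
        = (PySem.Set.ofList (m.map (fun p => p.2))).map (fun i => (((m.map (fun p => p.2)).count i : Int))) := by
      rw [List.map_map]
      apply List.map_congr_left
      intro v _
      simp only [Function.comp]
      rw [hlen v]
    rw [hml, ← pv_ofList_map_ofList]
  have hmemG : ∀ p ∈ (PySem.Set.ofList (m.map (fun p => p.2))).map
        (fun v => (v, (m.filter (fun p => p.2 == v)).map Prod.fst)),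
      ((p.2.length : Int)) ∈ (((m.map (fun p => p.2)).map (fun i => (((m.map (fun p => p.2)).count i : Int)))).foldl
        (fun r c => r.insert c PySem.Dict.empty)
        (PySem.Dict.empty : PySem.Dict Int (PySem.Dict Int (List String)))).keys := by
    intro p hp
    rw [hkeq]
    exact (PySem.Set.mem_ofList _ _).2 (List.mem_map.2 ⟨p, hp, rfl⟩)
  rw [pv_fill_eq_bucket _ _ hnd0 hmemG,
    pv_bucket_items_start _ _ hnd0 hget0 hkeq,
    pv_bucket_items_empty]
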